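-- pv_equiv track=rewrite | github.com/pypi-data/pypi-mirror-283 | packages/easydel/easydel-0.0.69.tar.gz/easydel-0.0.69/src/easydel/modules/flax_modelling_utils.py | get_maximum_depths
-- ===== SOURCE A (Python) =====
-- def get_maximum_depths(dictionary: dict):
--     maximums = {}
--     minimums = {}
--     for k, v in dictionary.items():
--         splits = k.split("/")
--         for index, split in enumerate(splits):
--             try:
--                 split = int(split)
--                 if str(index) in maximums.keys():
--                     current = maximums[str(index)]
--                     if current < split:
--                         maximums[str(index)] = split
--                 else:
--                     maximums[str(index)] = split
--                 if str(index) in minimums.keys():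
--                     split = int(split)
--                     if str(index) in minimums.keys():
--                         current = minimums[str(index)]
--                         if current > split:
--                             minimums[str(index)] = split
--                 else:
--                     minimums[str(index)] = split
--             except ValueError:
--                 ...
--     return maximums, minimums
-- ===== SOURCE B (Python) =====
-- def get_maximum_depths(dictionary: dict):
--     table = {}
--     for k in dictionary:
--         for index, split in enumerate(k.split("/")):
--             try:
--                 value = int(split)
--             except ValueError:
--                 continue
--             table.setdefault(str(index), []).append(value)
--     maximums = {i: max(vals) for i, vals in table.items()}
--     minimums = {i: min(vals) for i, vals in table.items()}
--     return maximums, minimums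
-- ===== Notes on version B (the rewrite author's own statement) =====
-- stated objective: alternative
-- what changed: Replaces A's online per-index min/max updates (two dicts maintained with nested membership/compare/insert branches during the scan) by a two-phase collect-then-reduce: one pass groups all int-parseable components into a dict str(index) -> list, then max()/min() comprehensions produce the two result dicts.
import Mathlib
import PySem

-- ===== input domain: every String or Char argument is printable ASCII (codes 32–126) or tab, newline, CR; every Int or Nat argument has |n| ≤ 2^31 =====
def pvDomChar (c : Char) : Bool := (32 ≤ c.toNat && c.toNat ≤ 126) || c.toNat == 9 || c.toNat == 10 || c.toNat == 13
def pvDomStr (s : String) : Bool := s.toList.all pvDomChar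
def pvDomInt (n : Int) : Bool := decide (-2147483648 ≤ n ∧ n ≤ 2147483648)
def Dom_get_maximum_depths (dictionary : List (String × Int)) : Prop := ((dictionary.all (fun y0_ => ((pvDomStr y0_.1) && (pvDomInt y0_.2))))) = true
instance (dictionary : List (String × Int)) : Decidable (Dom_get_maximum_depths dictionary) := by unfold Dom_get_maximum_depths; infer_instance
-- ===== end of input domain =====

-- B replaces A's online per-index min/max updates by a collect-into-lists pass followed by
-- max()/min() reductions (alternative decomposition, same asymptotic cost).

-- ===== PORT A =====
-- literal transliteration of A: one pass over the items, updating both dicts online.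
-- 'current = maximums[str(index)]' happens only under the 'in .keys()' guard, so the
-- getD default 0 is never the value actually read.
def get_maximum_depths (dictionary : List (String × Int)) :
    (List (String × Int)) × (List (String × Int)) :=
  let st := dictionary.foldl (fun st kv =>
    let splits := (PySem.Str.split? kv.1 "/").getD []
    (PySem.List.enumerate splits 0).foldl (fun st p =>
      match PySem.Int.ofStr? p.2 with
      | none => st  -- except ValueError: ...
      | some n =>
        let idx := PySem.Int.toStr p.1
        let maximums := if st.1.contains idx then
            (if st.1.getD idx 0 < n then st.1.insert idx n else st.1)
          else st.1.insert idx n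
        let minimums := if st.2.contains idx then
            (if st.2.getD idx 0 > n then st.2.insert idx n else st.2)
          else st.2.insert idx n
        (maximums, minimums)) st)
    ((PySem.Dict.empty : PySem.Dict String Int), (PySem.Dict.empty : PySem.Dict String Int))
  (st.1.items, st.2.items)

-- ===== PORT B =====
-- literal transliteration of Source B: group the parseable components per index, then reduce.
-- table values are always nonempty, so the max?/min? options are always some (the
-- filterMap renders the dict comprehensions {i: max(vals)} / {i: min(vals)}).
def get_maximum_depths_alt (dictionary : List (String × Int)) :
    (List (String × Int)) × (List (String × Int)) :=
  let table := dictionary.foldl (fun table kv =>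
    (PySem.List.enumerate ((PySem.Str.split? kv.1 "/").getD []) 0).foldl (fun table p =>
      match PySem.Int.ofStr? p.2 with
      | none => table  -- except ValueError: continue
      | some value => table.modify (PySem.Int.toStr p.1) [] (fun vs => vs ++ [value])) table)
    (PySem.Dict.empty : PySem.Dict String (List Int))
  (table.items.filterMap (fun iv => (PySem.List.max? iv.2 (fun x => x)).map (fun m => (iv.1, m))),
   table.items.filterMap (fun iv => (PySem.List.min? iv.2 (fun x => x)).map (fun m => (iv.1, m))))

-- ===== PRECONDITION & SPEC =====
def Spec_get_maximum_depths (dictionary : List (String × Int)) (out : (List (String × Int)) × (List (String × Int))) : Prop := out = get_maximum_depths_alt dictionary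
instance (dictionary : List (String × Int)) (out : (List (String × Int)) × (List (String × Int))) : Decidable (Spec_get_maximum_depths dictionary out) := by unfold Spec_get_maximum_depths; infer_instance

-- ===== CLAIM (what is proved, stated in full; the proofs are below) =====
def Claim_equal_get_maximum_depths : Prop := ∀ (dictionary : List (String × Int)), Dom_get_maximum_depths dictionary → Spec_get_maximum_depths dictionary (get_maximum_depths dictionary)

-- ===== LEMMAS AND PROOFS =====

-- A's online update of one of the two dicts, parametric in the comparison direction.
def pvStep (cond : Int → Int → Bool) (d : PySem.Dict String Int) (i : String) (n : Int) :
    PySem.Dict String Int :=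
  if d.contains i then (if cond (d.getD i 0) n then d.insert i n else d) else d.insert i n

-- first-extremal reduction of a value list, parametric in the comparison direction
def pvSel (cond : Int → Int → Bool) (vs : List Int) : Option Int :=
  match vs with
  | [] => none
  | m :: t => some (t.foldl (fun m x => if cond m x then x else m) m)

def pvRed (cond : Int → Int → Bool) (l : List (String × List Int)) : List (String × Int) :=
  l.filterMap (fun iv => (pvSel cond iv.2).map (fun m => (iv.1, m)))

-- the flattened stream of (str(index), parsed int) pairs both programs traverse
def pvPairs (dictionary : List (String × Int)) : List (String × Int) :=
  dictionary.flatMap (fun kv =>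
    (PySem.List.enumerate ((PySem.Str.split? kv.1 "/").getD []) 0).filterMap
      (fun p => (PySem.Int.ofStr? p.2).map (fun n => (PySem.Int.toStr p.1, n))))

theorem pv_foldl_ext {α σ : Type} (f g : σ → α → σ) (h : ∀ s a, f s a = g s a)
    (l : List α) (init : σ) : l.foldl f init = l.foldl g init := by
  induction l generalizing init with
  | nil => rfl
  | cons a t ih => simp only [List.foldl_cons, h, ih]

theorem pv_sel_max (vs : List Int) :
    PySem.List.max? vs (fun x => x) = pvSel (fun m x => decide (m < x)) vs := by
  cases vs with
  | nil => rfl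
  | cons m t =>
    rw [PySem.List.max?_id_cons]
    simp only [pvSel]
    congr 1
    apply pv_foldl_ext
    intro a b
    rcases lt_or_ge a b with h | h
    · simp [max_eq_right h.le, h]
    · simp [max_eq_left h, not_lt.mpr h]

theorem pv_sel_min (vs : List Int) :
    PySem.List.min? vs (fun x => x) = pvSel (fun m x => decide (x < m)) vs := by
  cases vs with
  | nil => rfl
  | cons m t =>
    rw [PySem.List.min?_id_cons]
    simp only [pvSel]
    congr 1
    apply pv_foldl_ext
    intro a b
    rcases lt_or_ge b a with h | h
    · simp [min_eq_right h.le, h]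
    · simp [min_eq_left h, not_lt.mpr h]

-- one step of A's update simulates one append on the table
theorem pv_map_id {ν : Type} (r : List (String × ν)) (i : String)
    (h : ∀ p ∈ r, (p.1 == i) = false) (x : String × ν) :
    r.map (fun p => if (p.1 == i) = true then x else p) = r := by
  induction r with
  | nil => rfl
  | cons a t ih =>
    have ha := h a List.mem_cons_self
    rw [List.map_cons, if_neg (by simp [ha]), ih (fun p hp => h p (List.mem_cons_of_mem _ hp))]

theorem pv_map_id' {ν : Type} (r : List (String × ν)) (i : String)
    (h : ∀ p ∈ r, (p.1 == i) = false) (x : String × ν) :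
    r.map (fun p => if p.1 = i then x else p) = r := by
  have := pv_map_id r i h x
  simpa using this

theorem pv_step_cons (cond : Int → Int → Bool) (p : String × Int) (r : List (String × Int))
    (i : String) (n : Int) (hbeq : (p.1 == i) = false) :
    pvStep cond (PySem.Dict.mk (p :: r)) i n
      = PySem.Dict.mk (p :: (pvStep cond (PySem.Dict.mk r) i n).items) := by
  simp [pvStep, PySem.Dict.insert, PySem.Dict.contains, PySem.Dict.getD, PySem.Dict.get?, hbeq]
  split_ifs <;> simp_all

theorem pv_modify_cons {ν : Type} (p : String × ν) (r : List (String × ν)) (i : String)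
    (dflt : ν) (f : ν → ν) (hbeq : (p.1 == i) = false) :
    ((PySem.Dict.mk (p :: r)).modify i dflt f).items
      = p :: ((PySem.Dict.mk r).modify i dflt f).items := by
  simp [PySem.Dict.modify, PySem.Dict.insert, PySem.Dict.contains, PySem.Dict.getD,
    PySem.Dict.get?, hbeq]
  split_ifs <;> simp_all

theorem pv_red_keys (cond : Int → Int → Bool) (l : List (String × List Int)) (p : String × Int)
    (hp : p ∈ pvRed cond l) : p.1 ∈ l.map Prod.fst := by
  simp only [pvRed, List.mem_filterMap] at hp
  obtain ⟨iv, hiv, hmap⟩ := hp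
  cases hsel : pvSel cond iv.2 with
  | none => rw [hsel] at hmap; simp at hmap
  | some mm =>
    rw [hsel] at hmap
    simp only [Option.map_some, Option.some.injEq] at hmap
    rw [← hmap]
    exact List.mem_map_of_mem hiv

theorem pv_step_red (cond : Int → Int → Bool) (l : List (String × List Int))
    (hnd : (l.map Prod.fst).Nodup) (hne : ∀ iv ∈ l, iv.2 ≠ []) (i : String) (n : Int) :
    pvStep cond (PySem.Dict.mk (pvRed cond l)) i n
      = PySem.Dict.mk (pvRed cond (((PySem.Dict.mk l).modify i [] (fun vs => vs ++ [n])).items)) := by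
  induction l with
  | nil =>
    simp [pvStep, pvRed, pvSel, PySem.Dict.modify, PySem.Dict.insert, PySem.Dict.contains,
      PySem.Dict.getD, PySem.Dict.get?]
  | cons a rest ih =>
    obtain ⟨i₁, vs⟩ := a
    have hvs : vs ≠ [] := hne _ List.mem_cons_self
    obtain ⟨m, tl, rfl⟩ : ∃ m tl, vs = m :: tl := by
      cases vs with
      | nil => exact absurd rfl hvs
      | cons m tl => exact ⟨m, tl, rfl⟩
    have hnd2 : (i₁ :: rest.map Prod.fst).Nodup := by simpa using hnd
    cases hbeq : (i₁ == i) with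
    | true =>
      have hi : i₁ = i := by simpa using hbeq
      subst hi
      have hni : i₁ ∉ rest.map Prod.fst := (List.nodup_cons.mp hnd2).1
      have hrest : ∀ p ∈ rest, (p.1 == i₁) = false := by
        intro p hp
        simp only [beq_eq_false_iff_ne, ne_eq]
        intro hc; exact hni (hc ▸ List.mem_map_of_mem hp)
      have hredrest : ∀ p ∈ pvRed cond rest, (p.1 == i₁) = false := by
        intro p hp
        simp only [beq_eq_false_iff_ne, ne_eq]
        intro hc; exact hni (hc ▸ pv_red_keys cond rest p hp)
      have hM : pvRed cond ((i₁, m :: tl) :: rest)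
          = (i₁, List.foldl (fun m x => if cond m x = true then x else m) m tl) :: pvRed cond rest := by
        simp [pvRed, pvSel]
      have hfind : List.find? (fun p => p.1 == i₁) ((i₁, m :: tl) :: rest) = some (i₁, m :: tl) := by
        simp
      have hmod : ((PySem.Dict.mk ((i₁, m :: tl) :: rest)).modify i₁ [] (fun vs => vs ++ [n])).items
          = (i₁, (m :: tl) ++ [n]) :: rest := by
        simp [PySem.Dict.modify, PySem.Dict.insert, PySem.Dict.contains, PySem.Dict.getD,
          PySem.Dict.get?, hfind, pv_map_id' _ _ hrest]
      have hred2 : pvRed cond ((i₁, (m :: tl) ++ [n]) :: rest)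
          = (i₁, if cond (List.foldl (fun m x => if cond m x = true then x else m) m tl) n = true
                  then n else List.foldl (fun m x => if cond m x = true then x else m) m tl)
              :: pvRed cond rest := by
        simp [pvRed, pvSel, List.foldl_append]
      rw [hM, hmod, hred2]
      have hfindr : List.find? (fun p => p.1 == i₁)
          ((i₁, List.foldl (fun m x => if cond m x = true then x else m) m tl) :: pvRed cond rest)
          = some (i₁, List.foldl (fun m x => if cond m x = true then x else m) m tl) := by
        simp
      cases hc : cond (List.foldl (fun m x => if cond m x = true then x else m) m tl) n <;>
        simp [pvStep, PySem.Dict.contains, PySem.Dict.getD, PySem.Dict.get?, PySem.Dict.insert,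
          hfindr, hc, pv_map_id' _ _ hredrest]
    | false =>
      have hmk : pvRed cond ((i₁, m :: tl) :: rest)
          = (i₁, List.foldl (fun m x => if cond m x = true then x else m) m tl) :: pvRed cond rest := by
        simp [pvRed, pvSel]
      rw [hmk, pv_step_cons cond _ _ _ _ hbeq, pv_modify_cons _ _ _ _ _ hbeq]
      have ihh := ih (List.nodup_cons.mp hnd2).2
        (fun iv hiv => hne iv (List.mem_cons_of_mem _ hiv))
      rw [ihh]
      simp [pvRed, pvSel]

theorem pv_fold_red (cond : Int → Int → Bool) (P : List (String × Int)) :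
    ∀ (t : PySem.Dict String (List Int)), (t.items.map Prod.fst).Nodup →
    (∀ iv ∈ t.items, iv.2 ≠ []) →
    P.foldl (fun d p => pvStep cond d p.1 p.2) (PySem.Dict.mk (pvRed cond t.items))
      = PySem.Dict.mk (pvRed cond
          ((P.foldl (fun d p => d.modify p.1 [] (fun vs => vs ++ [p.2])) t).items)) := by
  induction P with
  | nil => intro t _ _; rfl
  | cons p Pt ih =>
    intro t hnd hne
    rw [List.foldl_cons, List.foldl_cons]
    rw [pv_step_red cond t.items hnd hne p.1 p.2]
    have hnd' : (((t.modify p.1 [] (fun vs => vs ++ [p.2])).items).map Prod.fst).Nodup := by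
      have := PySem.Dict.nodup_keys_insert t p.1 (t.getD p.1 [] ++ [p.2])
        (by simpa [PySem.Dict.keys] using hnd)
      simpa [PySem.Dict.modify, PySem.Dict.keys] using this
    have hne' : ∀ iv ∈ (t.modify p.1 [] (fun vs => vs ++ [p.2])).items, iv.2 ≠ [] := by
      intro iv hiv
      rw [PySem.Dict.modify] at hiv
      rcases (PySem.Dict.mem_items_insert t p.1 _ iv).mp hiv with h | h
      · subst h; simp
      · exact hne iv h.1
    exact ih (t.modify p.1 [] (fun vs => vs ++ [p.2])) hnd' hne'

theorem pv_foldl_flatMap {α β σ : Type} (l : List α) (f : α → List β) (g : σ → β → σ)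
    (init : σ) : (l.flatMap f).foldl g init = l.foldl (fun s a => (f a).foldl g s) init := by
  induction l generalizing init with
  | nil => rfl
  | cons a t ih => simp [List.flatMap_cons, List.foldl_append, ih]

theorem pv_foldl_filterMap {α β σ : Type} (l : List α) (f : α → Option β) (g : σ → β → σ)
    (init : σ) :
    (l.filterMap f).foldl g init
      = l.foldl (fun s a => match f a with | none => s | some b => g s b) init := by
  induction l generalizing init with
  | nil => rfl
  | cons a t ih =>
    cases h : f a <;> simp [h, ih]

theorem pv_foldl_prod {α σ τ : Type} (P : List α) (g1 : σ → α → σ) (g2 : τ → α → τ)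
    (a : σ) (b : τ) :
    P.foldl (fun st q => (g1 st.1 q, g2 st.2 q)) (a, b) = (P.foldl g1 a, P.foldl g2 b) := by
  induction P generalizing a b with
  | nil => rfl
  | cons p t ih => simp [List.foldl_cons, ih]

-- A over the flattened pair stream
theorem pv_A_eq (dictionary : List (String × Int)) :
    get_maximum_depths dictionary
      = (((pvPairs dictionary).foldl (fun d p => pvStep (fun m x => decide (m < x)) d p.1 p.2) PySem.Dict.empty).items,
         ((pvPairs dictionary).foldl (fun d p => pvStep (fun m x => decide (x < m)) d p.1 p.2) PySem.Dict.empty).items) := by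
  unfold get_maximum_depths pvPairs
  have h : ∀ (st : PySem.Dict String Int × PySem.Dict String Int) (kv : String × Int),
      (PySem.List.enumerate ((PySem.Str.split? kv.1 "/").getD []) 0).foldl
        (fun st p => match PySem.Int.ofStr? p.2 with
          | none => st
          | some n =>
            let idx := PySem.Int.toStr p.1
            let maximums := if st.1.contains idx then
                (if st.1.getD idx 0 < n then st.1.insert idx n else st.1)
              else st.1.insert idx n
            let minimums := if st.2.contains idx then
                (if st.2.getD idx 0 > n then st.2.insert idx n else st.2)
              else st.2.insert idx n
            (maximums, minimums)) st
      = ((PySem.List.enumerate ((PySem.Str.split? kv.1 "/").getD []) 0).filterMap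
          (fun p => (PySem.Int.ofStr? p.2).map (fun n => (PySem.Int.toStr p.1, n)))).foldl
          (fun st q => (pvStep (fun m x => decide (m < x)) st.1 q.1 q.2,
                        pvStep (fun m x => decide (x < m)) st.2 q.1 q.2)) st := by
    intro st kv
    rw [pv_foldl_filterMap]
    apply pv_foldl_ext
    intro s p
    cases PySem.Int.ofStr? p.2 <;> simp [pvStep]
  simp only [h]
  rw [← pv_foldl_flatMap]
  rw [pv_foldl_prod _ (fun d (q : String × Int) => pvStep (fun m x => decide (m < x)) d q.1 q.2)
        (fun d (q : String × Int) => pvStep (fun m x => decide (x < m)) d q.1 q.2)]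

-- B's table over the flattened pair stream
theorem pv_B_eq (dictionary : List (String × Int)) :
    get_maximum_depths_alt dictionary
      = (pvRed (fun m x => decide (m < x)) ((pvPairs dictionary).foldl (fun d p => d.modify p.1 [] (fun vs => vs ++ [p.2])) PySem.Dict.empty).items,
         pvRed (fun m x => decide (x < m)) ((pvPairs dictionary).foldl (fun d p => d.modify p.1 [] (fun vs => vs ++ [p.2])) PySem.Dict.empty).items) := by
  unfold get_maximum_depths_alt pvPairs
  have h : ∀ (table : PySem.Dict String (List Int)) (kv : String × Int),
      (PySem.List.enumerate ((PySem.Str.split? kv.1 "/").getD []) 0).foldl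
        (fun table p => match PySem.Int.ofStr? p.2 with
          | none => table
          | some value => table.modify (PySem.Int.toStr p.1) [] (fun vs => vs ++ [value])) table
      = ((PySem.List.enumerate ((PySem.Str.split? kv.1 "/").getD []) 0).filterMap
          (fun p => (PySem.Int.ofStr? p.2).map (fun n => (PySem.Int.toStr p.1, n)))).foldl
          (fun d p => d.modify p.1 [] (fun vs => vs ++ [p.2])) table := by
    intro table kv
    rw [pv_foldl_filterMap]
    apply pv_foldl_ext
    intro s p
    cases PySem.Int.ofStr? p.2 <;> simp
  simp only [h, pvRed, ← pv_sel_max, ← pv_sel_min]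
  rw [← pv_foldl_flatMap]

-- ===== VERDICT (by name: the statement is the Claim_ definition above) =====
theorem get_maximum_depths_spec : Claim_equal_get_maximum_depths := by
  intro dictionary _
  unfold Spec_get_maximum_depths
  rw [pv_A_eq, pv_B_eq]
  have h1 := pv_fold_red (fun m x => decide (m < x)) (pvPairs dictionary) PySem.Dict.empty (by simp [PySem.Dict.empty]) (by simp [PySem.Dict.empty])
  have h2 := pv_fold_red (fun m x => decide (x < m)) (pvPairs dictionary) PySem.Dict.empty (by simp [PySem.Dict.empty]) (by simp [PySem.Dict.empty])
  simp only [PySem.Dict.empty, pvRed, List.filterMap_nil] at h1 h2 ⊢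
  rw [h1, h2]
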